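-- pv_equiv track=rewrite | github.com/RandFa/Bioinformatics | antibiotics.py | consistent
-- ===== SOURCE A (Python) =====
-- import copy
--
-- mass = {'G': 57, 'A': 71, 'S': 87, 'P': 97, 'V': 99, 'T': 101, 'C': 103, 'I': 113, 'L': 113, 'N': 114, 'D': 115, 'K': 128, 'Q': 128, 'E': 129, 'M': 131, 'H': 137, 'F': 147, 'R': 156, 'Y': 163, 'W': 186}
--
-- aminoAcid = ['G', 'A', 'S', 'P', 'V', 'T', 'C',"I", 'L', 'N', 'D',"K", 'Q', 'E', 'M', 'H', 'F', 'R', 'Y', 'W']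
--
-- def LinearSpectrum(Peptide, Alphabet, AminoAcidMass):
--     """
--     Input: An amino acid string Peptide.
--     Output: The linear spectrum of Peptide.
--     """
--     PrefixMass = {}
--     PrefixMass[0]= 0
--     for i in range(len(Peptide)):
--         for s in Alphabet:
--             if s == Peptide[i] :
--                 PrefixMass[i+1] = PrefixMass[i] + AminoAcidMass[s]
--     LinearSpectrum = [0]
--     for i in range(len(PrefixMass)):
--         for j in range(i+1, len(PrefixMass)):
--             a  =PrefixMass[j] - PrefixMass[i]
--             LinearSpectrum.append(a)
--     LinearSpectrum.sort()
--     return LinearSpectrum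
--
-- def consistent(peptide, spectrum):
--     b = copy.deepcopy(spectrum)
--     nk = LinearSpectrum(peptide, aminoAcid, mass)
--     for nnk in nk:
--         if nnk not in b:
--             return "no"
--         else:
--             b.remove(nnk)
--     return "yes"
-- ===== SOURCE B (Python) =====
-- mass = {'G': 57, 'A': 71, 'S': 87, 'P': 97, 'V': 99, 'T': 101, 'C': 103, 'I': 113, 'L': 113, 'N': 114, 'D': 115, 'K': 128, 'Q': 128, 'E': 129, 'M': 131, 'H': 137, 'F': 147, 'R': 156, 'Y': 163, 'W': 186}
--
-- def consistent(peptide, spectrum):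
--     # prefix masses of the leading run of known residues
--     prefix = [0]
--     t = 0
--     for c in peptide:
--         if c not in mass:
--             break
--         t += mass[c]
--         prefix.append(t)
--     L = len(prefix)
--     nk = sorted([0] + [prefix[j] - prefix[i] for i in range(L) for j in range(i + 1, L)])
--     # two-pointer walk over a sorted copy of the spectrum (spectrum itself is not mutated)
--     s = sorted(spectrum)
--     i = 0
--     for v in nk:
--         while i < len(s) and s[i] < v:
--             i += 1
--         if i == len(s) or s[i] != v:
--             return "no"
--         i += 1
--     return "yes"
-- ===== Notes on version B (the rewrite author's own statement) =====
-- stated objective: alternative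
-- what changed: B replaces A's dict-built prefix masses and quadratic 'membership test + list.remove per spectrum element' check by a single prefix-sum scan, a sorted difference list and a two-pointer walk over a sorted copy of the spectrum.
import Mathlib
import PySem

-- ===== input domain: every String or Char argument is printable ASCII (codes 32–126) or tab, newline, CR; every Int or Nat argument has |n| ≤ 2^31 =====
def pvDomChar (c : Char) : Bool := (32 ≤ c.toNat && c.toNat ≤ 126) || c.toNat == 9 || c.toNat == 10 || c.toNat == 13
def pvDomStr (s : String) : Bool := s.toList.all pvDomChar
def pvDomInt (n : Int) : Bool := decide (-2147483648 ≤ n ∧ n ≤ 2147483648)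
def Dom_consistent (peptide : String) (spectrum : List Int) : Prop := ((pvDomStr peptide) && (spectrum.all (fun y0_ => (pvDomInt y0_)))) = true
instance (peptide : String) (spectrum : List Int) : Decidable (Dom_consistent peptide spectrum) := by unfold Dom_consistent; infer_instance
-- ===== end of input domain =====

-- B replaces A's remove-based multiset check by sorting a copy of the spectrum and walking it
-- with two pointers, and builds the prefix masses by a single scan; objective: alternative.

-- ===== PORT A =====
def pvMass : PySem.Dict Char Int := PySem.Dict.mk
  [('G',57),('A',71),('S',87),('P',97),('V',99),('T',101),('C',103),('I',113),('L',113),('N',114),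
   ('D',115),('K',128),('Q',128),('E',129),('M',131),('H',137),('F',147),('R',156),('Y',163),('W',186)]

def pvAminoAcid : List Char :=
  ['G','A','S','P','V','T','C','I','L','N','D','K','Q','E','M','H','F','R','Y','W']

-- Port of LinearSpectrum. The dict lookups PrefixMass[i] / PrefixMass[j] raise KeyError in Python
-- exactly when an unknown residue is followed by a known one; they are ported with default 0 and
-- Pre_consistent excludes exactly those inputs.
def pvLinearSpectrumA (Peptide : List Char) : List Int :=
  let PrefixMass : PySem.Dict Int Int := (PySem.Dict.empty).insert 0 0
  let PrefixMass := (PySem.List.pyRange 0 (Peptide.length : Int) 1).foldl (fun d i =>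
    pvAminoAcid.foldl (fun d s =>
      if PySem.List.pyGet? Peptide i = some s then
        d.insert (i+1) (d.getD i 0 + pvMass.getD s 0)
      else d) d) PrefixMass
  let ls : List Int := [0]
  let m : Int := PrefixMass.size
  let ls := (PySem.List.pyRange 0 m 1).foldl (fun acc i =>
    (PySem.List.pyRange (i+1) m 1).foldl (fun acc j =>
      acc ++ [PrefixMass.getD j 0 - PrefixMass.getD i 0]) acc) ls
  PySem.List.sorted ls (fun x => x) false

-- the 'for nnk in nk: if nnk not in b: return "no" else: b.remove(nnk)' loop
def pvRemoveLoop : List Int → List Int → String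
  | [], _ => "yes"
  | nnk :: rest, b =>
    if nnk ∈ b then pvRemoveLoop rest ((PySem.List.remove? b nnk).getD b)
    else "no"

def consistent (peptide : String) (spectrum : List Int) : String :=
  let b := spectrum  -- copy.deepcopy(spectrum); only the copy is consumed
  let nk := pvLinearSpectrumA peptide.toList
  pvRemoveLoop nk b

-- ===== PORT B =====
-- the 'for c in peptide: if c not in mass: break; t += mass[c]; prefix.append(t)' loop
def pvBuildPrefix : List Char → List Int → Int → List Int
  | [], acc, _ => acc
  | c :: cs, acc, t =>
    match pvMass.get? c with
    | none => acc
    | some m => pvBuildPrefix cs (acc ++ [t + m]) (t + m)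

-- the two-pointer walk; the index i into s is represented by the remaining suffix of s,
-- the 'while i < len(s) and s[i] < v' advance is dropWhile on that suffix
def pvTwoPtr : List Int → List Int → String
  | [], _ => "yes"
  | v :: vs, s =>
    match s.dropWhile (fun x => decide (x < v)) with
    | [] => "no"
    | x :: rest => if x = v then pvTwoPtr vs rest else "no"

def consistent_alt (peptide : String) (spectrum : List Int) : String :=
  let pref := pvBuildPrefix peptide.toList [0] 0
  let L : Int := pref.length
  let nk := PySem.List.sorted
    (0 :: (PySem.List.pyRange 0 L 1).flatMap (fun i =>
      (PySem.List.pyRange (i+1) L 1).map (fun j =>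
        PySem.List.pyGetD pref j 0 - PySem.List.pyGetD pref i 0)))
    (fun x => x) false
  pvTwoPtr nk (PySem.List.sorted spectrum (fun x => x) false)

-- ===== PRECONDITION & SPEC =====
-- Pre_ excludes exactly the peptides where a known residue follows an unknown one: there Python's A
-- raises KeyError (PrefixMass[i] with a missing key) and returns no value.
def Pre_consistent (peptide : String) (spectrum : List Int) : Prop :=
  (peptide.toList.dropWhile (fun c => decide (c ∈ pvAminoAcid))).all
    (fun c => decide (c ∉ pvAminoAcid)) = true
instance (peptide : String) (spectrum : List Int) : Decidable (Pre_consistent peptide spectrum) := by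
  unfold Pre_consistent; infer_instance

def pvWitness_consistent : String × List Int := ("GA", [0, 57, 71, 128])

def Spec_consistent (peptide : String) (spectrum : List Int) (out : String) : Prop := out = consistent_alt peptide spectrum
instance (peptide : String) (spectrum : List Int) (out : String) : Decidable (Spec_consistent peptide spectrum out) := by unfold Spec_consistent; infer_instance

-- ===== CLAIM (what is proved, stated in full; the proofs are below) =====
def Claim_equal_consistent : Prop := ∀ (peptide : String) (spectrum : List Int), Dom_consistent peptide spectrum → Pre_consistent peptide spectrum → Spec_consistent peptide spectrum (consistent peptide spectrum)

-- ===== LEMMAS AND PROOFS =====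

-- membership in the alphabet list coincides with presence in the mass dict
lemma pv_mem_iff_get? (c : Char) : c ∈ pvAminoAcid ↔ (pvMass.get? c).isSome := by
  have hk : pvMass.keys = pvAminoAcid := by decide
  rw [← hk, Option.isSome_iff_ne_none, ne_eq, PySem.Dict.get?_eq_none_iff_not_mem_keys, not_not]

-- the tail of prefix masses contributed by a list of residues, starting from running sum t
def pvTail : List Char → Int → List Int
  | [], _ => []
  | c :: cs, t =>
    match pvMass.get? c with
    | none => []
    | some m => (t + m) :: pvTail cs (t + m)

lemma pvBuildPrefix_eq (cs : List Char) : ∀ acc t, pvBuildPrefix cs acc t = acc ++ pvTail cs t := by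
  induction cs with
  | nil => intro acc t; simp [pvBuildPrefix, pvTail]
  | cons c cs ih =>
    intro acc t
    simp only [pvBuildPrefix, pvTail]
    cases pvMass.get? c with
    | none => simp
    | some m => simp [ih]

-- lookup in a dict whose items are an enumeration of a list
lemma pv_get?_enum (l : List Int) : ∀ (s j : Int),
    (PySem.Dict.mk (PySem.List.enumerate l s)).get? j =
      if 0 ≤ j - s then l[(j - s).toNat]? else none := by
  induction l with
  | nil => intro s j; simp [PySem.List.enumerate_nil, PySem.Dict.get?]
  | cons x xs ih =>
    intro s j
    rw [PySem.List.enumerate_cons, PySem.Dict.get?_mk_cons]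
    rcases eq_or_ne s j with rfl | hne
    · simp
    · have : (s == j) = false := by simpa using hne
      rw [this, if_neg (by simp), ih (s+1) j]
      rcases lt_trichotomy j s with h | h | h
      · rw [if_neg (by omega), if_neg (by omega)]
      · omega
      · rw [if_pos (by omega), if_pos (by omega)]
        have h1 : (j - s).toNat = (j - (s+1)).toNat + 1 := by omega
        rw [h1]
        simp

-- a conditional-insert scan over characters none of which is c leaves the dict unchanged
lemma pv_fold_none (l : List Char) (c : Char) (k : Int) (v : PySem.Dict Int Int → Char → Int)
    (hc : c ∉ l) (d : PySem.Dict Int Int) :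
    l.foldl (fun d s => if c = s then d.insert k (v d s) else d) d = d := by
  rw [PySem.List.foldl_ite_eq_foldl_filter]
  have : l.filter (fun s => decide (c = s)) = [] := by
    rw [List.filter_eq_nil_iff]; intro a ha
    simp only [decide_eq_true_eq]
    rintro rfl; exact hc ha
  rw [this]; rfl

-- the inner alphabet scan performs at most one insertion
lemma pv_inner_fold (l : List Char) (hl : l.Nodup) (c : Char) (k : Int)
    (v : PySem.Dict Int Int → Char → Int) :
    ∀ d : PySem.Dict Int Int,
      l.foldl (fun d s => if c = s then d.insert k (v d s) else d) d =
        if c ∈ l then d.insert k (v d c) else d := by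
  induction l with
  | nil => intro d; simp
  | cons a l ih =>
    intro d
    simp only [List.foldl_cons]
    rcases eq_or_ne c a with rfl | hne
    · rw [if_pos rfl, pv_fold_none l c k v (by simp at hl; exact hl.1) _]
      simp
    · rw [if_neg hne, ih (by simp at hl; exact hl.2) d]
      simp [hne]

-- the body of A's phase-1 loop over peptide indices
def pvBody (chars : List Char) (d : PySem.Dict Int Int) (i : Int) : PySem.Dict Int Int :=
  pvAminoAcid.foldl (fun d s' =>
    if PySem.List.pyGet? chars i = some s' then
      d.insert (i+1) (d.getD i 0 + pvMass.getD s' 0)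
    else d) d

lemma pvBody_eq (chars : List Char) (d : PySem.Dict Int Int) (i : Int) (c : Char)
    (h : PySem.List.pyGet? chars i = some c) :
    pvBody chars d i =
      if c ∈ pvAminoAcid then d.insert (i+1) (d.getD i 0 + pvMass.getD c 0) else d := by
  unfold pvBody
  simp only [h, Option.some.injEq]
  exact pv_inner_fold pvAminoAcid (by decide) c (i+1) (fun d s' => d.getD i 0 + pvMass.getD s' 0) d

-- the phase-1 loop over indices of all-unknown residues leaves the dict unchanged
lemma pv_phase1_unknown (chars : List Char) (cs : List Char) : ∀ (s : Nat) (d : PySem.Dict Int Int),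
    (∀ k : Nat, k < cs.length → PySem.List.pyGet? chars ((s : Int) + k) = cs[k]?) →
    (∀ c ∈ cs, pvMass.get? c = none) →
    (PySem.List.pyRange (s : Int) ((s : Int) + cs.length) 1).foldl (pvBody chars) d = d := by
  induction cs with
  | nil =>
    intro s d _ _
    rw [PySem.List.pyRange_one_eq_nil (by simp)]
    rfl
  | cons c cs ih =>
    intro s d hidx hun
    rw [PySem.List.pyRange_one_cons (by push_cast [List.length_cons]; omega), List.foldl_cons]
    have h0 : PySem.List.pyGet? chars ((s : Int) + (0 : Nat)) = some c := by
      rw [hidx 0 (by simp)]; simp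
    simp only [Nat.cast_zero, add_zero] at h0
    rw [pvBody_eq chars d _ c h0, if_neg (by rw [pv_mem_iff_get?, hun c (by simp)]; simp)]
    have := ih (s+1) d (fun k hk => by
      have := hidx (k+1) (by simpa using hk)
      push_cast at this ⊢
      rw [show ((s:Int)+1+(k:Int)) = (s:Int)+((k:Int)+1) by ring, this]; simp) (fun c' hc' => hun c' (by simp [hc']))
    simp only [List.length_cons] at *
    push_cast at this ⊢
    rw [show (s:Int)+((cs.length:Int)+1) = (s:Int)+1+(cs.length:Int) by ring]
    exact this

-- main phase-1 invariant: the dict is the enumeration of the prefix-mass list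
lemma pv_phase1 (chars : List Char) : ∀ (cs : List Char),
    (∀ c ∈ cs.dropWhile (fun c => decide (c ∈ pvAminoAcid)), c ∉ pvAminoAcid) →
    ∀ (s : Nat) (pres : List Int) (t : Int),
    (∀ k : Nat, k < cs.length → PySem.List.pyGet? chars ((s : Int) + k) = cs[k]?) →
    pres.length = s + 1 → pres[s]? = some t →
    (PySem.List.pyRange (s : Int) ((s : Int) + cs.length) 1).foldl (pvBody chars)
        (PySem.Dict.mk (PySem.List.enumerate pres 0)) =
      PySem.Dict.mk (PySem.List.enumerate (pres ++ pvTail cs t) 0) := by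
  intro cs
  induction cs with
  | nil =>
    intro _ s pres t _ _ _
    rw [PySem.List.pyRange_one_eq_nil (by simp), pvTail]
    simp
  | cons c cs ih =>
    intro hpre s pres t hidx hlen hp
    cases hgc : pvMass.get? c with
    | none =>
      have hcna : c ∉ pvAminoAcid := by rw [pv_mem_iff_get?, hgc]; simp
      have hall : ∀ c' ∈ c :: cs, pvMass.get? c' = none := by
        have hdw : (c :: cs).dropWhile (fun c => decide (c ∈ pvAminoAcid)) = c :: cs :=
          List.dropWhile_cons_of_neg (by simpa using hcna)
        intro c' hc'
        have := hpre c' (by rwa [hdw])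
        rw [← Option.not_isSome_iff_eq_none, ← pv_mem_iff_get?]
        exact this
      rw [pv_phase1_unknown chars (c :: cs) s _ hidx hall, pvTail, hgc]
      simp
    | some m =>
      have hca : c ∈ pvAminoAcid := by rw [pv_mem_iff_get?, hgc]; simp
      have h0 : PySem.List.pyGet? chars ((s : Int)) = some c := by
        have := hidx 0 (by simp)
        simpa using this
      rw [PySem.List.pyRange_one_cons (by push_cast [List.length_cons]; omega), List.foldl_cons,
        pvBody_eq chars _ _ c h0, if_pos hca]
      have hgetD : (PySem.Dict.mk (PySem.List.enumerate pres 0)).getD ((s : Int)) 0 = t := by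
        rw [PySem.Dict.getD_eq_get?_getD, pv_get?_enum pres 0 (s : Int)]
        rw [if_pos (by omega)]
        simp only [sub_zero, Int.toNat_natCast]
        rw [hp]; rfl
      have hmv : pvMass.getD c 0 = m := by rw [PySem.Dict.getD_eq_get?_getD, hgc]; rfl
      have hnc : (PySem.Dict.mk (PySem.List.enumerate pres 0)).contains ((s : Int) + 1) = false := by
        rw [PySem.Dict.contains_eq_isSome_get?, pv_get?_enum pres 0 ((s : Int) + 1)]
        rw [if_pos (by omega)]
        have : ((s : Int) + 1 - 0).toNat = s + 1 := by omega
        rw [this, List.getElem?_eq_none (by omega)]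
        rfl
      have hins : (PySem.Dict.mk (PySem.List.enumerate pres 0)).insert ((s : Int) + 1)
            ((PySem.Dict.mk (PySem.List.enumerate pres 0)).getD ((s : Int)) 0 + pvMass.getD c 0) =
          PySem.Dict.mk (PySem.List.enumerate (pres ++ [t + m]) 0) := by
        apply PySem.Dict.ext
        rw [PySem.Dict.items_insert_of_not_contains _ _ hnc]
        rw [hgetD, hmv]
        show PySem.List.enumerate pres 0 ++ [((s : Int) + 1, t + m)] =
          (PySem.Dict.mk (PySem.List.enumerate (pres ++ [t + m]) 0)).items
        rw [show (PySem.Dict.mk (PySem.List.enumerate (pres ++ [t + m]) 0)).items =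
          PySem.List.enumerate (pres ++ [t + m]) 0 from rfl]
        rw [PySem.List.enumerate_append]
        congr 1
        rw [PySem.List.enumerate_cons, PySem.List.enumerate_nil]
        rw [hlen]
        push_cast
        ring_nf
      rw [hins]
      have hdw : (c :: cs).dropWhile (fun c => decide (c ∈ pvAminoAcid)) =
          cs.dropWhile (fun c => decide (c ∈ pvAminoAcid)) :=
        List.dropWhile_cons_of_pos (by simpa using hca)
      have := ih (by rw [hdw] at hpre; exact hpre) (s+1) (pres ++ [t+m]) (t+m)
        (fun k hk => by
          have := hidx (k+1) (by simpa using hk)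
          push_cast at this ⊢
          rw [show ((s:Int)+1+(k:Int)) = (s:Int)+((k:Int)+1) by ring, this]; simp)
        (by simp [hlen])
        (by rw [List.getElem?_append_right (by omega)]; simp [hlen])
      simp only [List.length_cons] at *
      push_cast at this ⊢
      rw [show (s:Int)+((cs.length:Int)+1) = (s:Int)+1+(cs.length:Int) by ring]
      rw [this, pvTail, hgc]
      simp

-- a cons-and-erase step of multiset inclusion
lemma pv_cons_le (a : Int) (s t : Multiset Int) (h : a ∈ t) : a ::ₘ s ≤ t ↔ s ≤ t.erase a := by
  constructor
  · intro hle
    rw [Multiset.le_iff_count] at *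
    intro x
    have := hle x
    rcases eq_or_ne x a with rfl|hx
    · simp only [Multiset.count_cons_self] at this
      rw [Multiset.count_erase_self]; omega
    · simpa [Multiset.count_cons_of_ne hx, Multiset.count_erase_of_ne hx] using this
  · intro hle
    calc a ::ₘ s ≤ a ::ₘ t.erase a := Multiset.cons_le_cons a hle
    _ = t := Multiset.cons_erase h

-- the remove loop decides multiset inclusion
lemma pvRemoveLoop_eq (nk : List Int) : ∀ b : List Int,
    pvRemoveLoop nk b = if (↑nk : Multiset Int) ≤ ↑b then "yes" else "no" := by
  induction nk with
  | nil => intro b; simp [pvRemoveLoop]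
  | cons nnk rest ih =>
    intro b
    rw [pvRemoveLoop]
    by_cases hm : nnk ∈ b
    · rw [if_pos hm, PySem.List.remove?_eq_some_erase b nnk hm, Option.getD_some, ih]
      have h2 : (↑(nnk :: rest) : Multiset Int) ≤ ↑b ↔ (↑rest : Multiset Int) ≤ ↑(b.erase nnk) := by
        rw [← Multiset.cons_coe, ← Multiset.coe_erase]
        exact pv_cons_le nnk _ _ (by simpa using hm)
      simp only [h2]
    · rw [if_neg hm, if_neg]
      intro hle
      exact hm (by
        have : nnk ∈ (↑(nnk :: rest) : Multiset Int) := by simp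
        simpa using Multiset.mem_of_le hle this)

-- the first element surviving a dropWhile fails the predicate
lemma pv_dropWhile_head_false (p : Int → Bool) (l : List Int) (x : Int) (rest : List Int)
    (h : l.dropWhile p = x :: rest) : p x = false := by
  induction l with
  | nil => simp at h
  | cons a l ih =>
    rw [List.dropWhile_cons] at h
    by_cases hp : p a
    · exact ih (by simpa [hp] using h)
    · simp [hp] at h
      simp [← h.1, Bool.not_eq_true] at hp ⊢; exact hp

-- the two-pointer walk decides multiset inclusion on sorted inputs
lemma pvTwoPtr_eq (nk : List Int) : ∀ s : List Int,
    nk.Pairwise (· ≤ ·) → s.Pairwise (· ≤ ·) →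
    pvTwoPtr nk s = if (↑nk : Multiset Int) ≤ ↑s then "yes" else "no" := by
  induction nk with
  | nil => intro s _ _; rw [if_pos (by simp)]; rfl
  | cons v vs ih =>
    intro s hnk hs
    rw [pvTwoPtr]
    have hsplit := List.takeWhile_append_dropWhile (p := fun x => decide (x < v)) (l := s)
    have h1 : ∀ y ∈ s.takeWhile (fun x => decide (x < v)), y < v := by
      intro y hy
      simpa using List.mem_takeWhile_imp hy
    cases hdw : s.dropWhile (fun x => decide (x < v)) with
    | nil =>
      rw [if_neg]
      intro hle
      have hv : v ∈ s := by
        have : v ∈ (↑(v :: vs) : Multiset Int) := by simp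
        simpa using Multiset.mem_of_le hle this
      rw [← hsplit, hdw, List.append_nil] at hv
      exact absurd (h1 v hv) (lt_irrefl v)
    | cons x rest =>
      have hxv : ¬ (x < v) := by simpa using pv_dropWhile_head_false _ s x rest hdw
      have hs2 : (x :: rest).Pairwise (fun a b : Int => a ≤ b) := by
        rw [← hdw]; exact hs.sublist (List.dropWhile_sublist _)
      rw [show (match x :: rest with
          | [] => "no"
          | y :: r => if y = v then pvTwoPtr vs r else "no") =
          if x = v then pvTwoPtr vs rest else "no" from rfl]
      by_cases hxeq : x = v
      · subst hxeq
        rw [if_pos rfl, ih rest (List.Pairwise.of_cons hnk) (List.Pairwise.of_cons hs2)]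
        have hiff : (↑(x :: vs) : Multiset Int) ≤ ↑s ↔ (↑vs : Multiset Int) ≤ ↑rest := by
          constructor
          · intro hle
            rw [Multiset.le_iff_count] at hle ⊢
            intro y
            by_cases hyv : y ∈ vs
            · have hvy : x ≤ y := (List.pairwise_cons.mp hnk).1 y hyv
              have hy1 : y ∉ s.takeWhile (fun z => decide (z < x)) := by
                intro hmem; exact absurd (h1 y hmem) (by omega)
              have hcs : List.count y s =
                  List.count y (s.takeWhile (fun z => decide (z < x))) + List.count y (x :: rest) := by
                conv_lhs => rw [← hsplit, hdw]
                rw [List.count_append]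
              have hc0 : List.count y (s.takeWhile (fun z => decide (z < x))) = 0 :=
                List.count_eq_zero.mpr hy1
              have := hle y
              simp only [Multiset.coe_count] at this ⊢
              rw [hcs, hc0] at this
              by_cases hxy : y = x
              · subst hxy
                simp only [List.count_cons_self] at this; omega
              · rw [List.count_cons_of_ne (fun h => hxy h.symm),
                  List.count_cons_of_ne (fun h => hxy h.symm)] at this; omega
            · simp [Multiset.coe_count, List.count_eq_zero.mpr hyv]
          · intro hle
            have h2 : (↑(x :: vs) : Multiset Int) ≤ ↑(x :: rest) := by
              rw [← Multiset.cons_coe, ← Multiset.cons_coe]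
              exact Multiset.cons_le_cons x hle
            calc (↑(x :: vs) : Multiset Int) ≤ ↑(x :: rest) := h2
              _ ≤ ↑(s.takeWhile (fun z => decide (z < x))) + ↑(x :: rest) := Multiset.le_add_left _ _
              _ = ↑(s.takeWhile (fun z => decide (z < x)) ++ (x :: rest)) := (Multiset.coe_add _ _).symm
              _ = ↑s := by rw [← hdw, hsplit]
        simp only [hiff]
      · rw [if_neg hxeq, if_neg]
        intro hle
        have hv : v ∈ s := by
          have : v ∈ (↑(v :: vs) : Multiset Int) := by simp
          simpa using Multiset.mem_of_le hle this
        conv at hv => rw [← hsplit, hdw]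
        rw [List.mem_append] at hv
        rcases hv with hv | hv
        · exact absurd (h1 v hv) (lt_irrefl v)
        · have hxlt : x < v := by
            rcases List.mem_cons.mp hv with rfl | hv'
            · exact absurd rfl hxeq
            · have := (List.pairwise_cons.mp hs2).1 v hv'
              omega
          exact hxv hxlt

-- getD on the enumerated dict agrees with pyGetD on the underlying list (nonnegative keys)
lemma pv_getD_enum (pres : List Int) (j : Int) (h0 : 0 ≤ j) :
    (PySem.Dict.mk (PySem.List.enumerate pres 0)).getD j 0 = PySem.List.pyGetD pres j 0 := by
  rw [PySem.Dict.getD_eq_get?_getD, pv_get?_enum pres 0 j, if_pos (by omega),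
    PySem.List.pyGetD_of_nonneg pres 0 h0]
  simp [List.getD_eq_getElem?_getD]

-- the two sorted spectra agree
lemma pv_spectra_eq (peptide : String)
    (hpre : ∀ c ∈ peptide.toList.dropWhile (fun c => decide (c ∈ pvAminoAcid)), c ∉ pvAminoAcid) :
    pvLinearSpectrumA peptide.toList =
      (let pref := pvBuildPrefix peptide.toList [0] 0
       let L : Int := pref.length
       PySem.List.sorted
        (0 :: (PySem.List.pyRange 0 L 1).flatMap (fun i =>
          (PySem.List.pyRange (i+1) L 1).map (fun j =>
            PySem.List.pyGetD pref j 0 - PySem.List.pyGetD pref i 0)))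
        (fun x => x) false) := by
  have hphase1 := pv_phase1 peptide.toList peptide.toList hpre 0 [0] 0
    (fun k _hk => by simp [PySem.List.pyGet?_natCast])
    (by simp) (by simp)
  simp only [Nat.cast_zero, zero_add] at hphase1
  have hpref : pvBuildPrefix peptide.toList [0] 0 = [0] ++ pvTail peptide.toList 0 :=
    pvBuildPrefix_eq peptide.toList [0] 0
  have hphase1' :
      List.foldl
        (fun d i =>
          List.foldl
            (fun d s =>
              if PySem.List.pyGet? peptide.toList i = some s then
                d.insert (i + 1) (d.getD i 0 + pvMass.getD s 0)
              else d)
            d pvAminoAcid)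
        ((PySem.Dict.empty : PySem.Dict Int Int).insert 0 0)
        (PySem.List.pyRange 0 (peptide.toList.length : Int) 1) =
      PySem.Dict.mk (PySem.List.enumerate ([0] ++ pvTail peptide.toList 0) 0) := hphase1
  simp only [pvLinearSpectrumA]
  rw [hphase1', hpref]
  have hsize : (PySem.Dict.mk (PySem.List.enumerate ([0] ++ pvTail peptide.toList 0) 0)).size =
      ([0] ++ pvTail peptide.toList 0).length := by
    show (PySem.List.enumerate ([0] ++ pvTail peptide.toList 0) 0).length = _
    exact PySem.List.length_enumerate _ _
  rw [hsize]
  set pfull := [0] ++ pvTail peptide.toList 0 with hpfull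
  have hinner : ∀ acc : List Int, ∀ i : Int,
      (PySem.List.pyRange (i+1) (pfull.length : Int) 1).foldl (fun acc j =>
        acc ++ [(PySem.Dict.mk (PySem.List.enumerate pfull 0)).getD j 0 -
                (PySem.Dict.mk (PySem.List.enumerate pfull 0)).getD i 0]) acc =
      acc ++ (PySem.List.pyRange (i+1) (pfull.length : Int) 1).map (fun j =>
        (PySem.Dict.mk (PySem.List.enumerate pfull 0)).getD j 0 -
        (PySem.Dict.mk (PySem.List.enumerate pfull 0)).getD i 0) := by
    intro acc i
    exact PySem.List.foldl_append_singleton_eq_map _ _ _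
  simp only [hinner]
  rw [PySem.List.foldl_append_eq_flatMap]
  congr 1
  rw [show ([0] ++ (PySem.List.pyRange 0 (pfull.length : Int) 1).flatMap fun i =>
      (PySem.List.pyRange (i+1) (pfull.length : Int) 1).map fun j =>
        (PySem.Dict.mk (PySem.List.enumerate pfull 0)).getD j 0 -
        (PySem.Dict.mk (PySem.List.enumerate pfull 0)).getD i 0) =
    (0 :: (PySem.List.pyRange 0 (pfull.length : Int) 1).flatMap fun i =>
      (PySem.List.pyRange (i+1) (pfull.length : Int) 1).map fun j =>
        (PySem.Dict.mk (PySem.List.enumerate pfull 0)).getD j 0 -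
        (PySem.Dict.mk (PySem.List.enumerate pfull 0)).getD i 0) from rfl]
  congr 1
  apply List.flatMap_congr
  intro i hi
  have hi0 : 0 ≤ i := (PySem.List.mem_pyRange_one.mp hi).1
  apply List.map_congr_left
  intro j hj
  have hj0 : 0 ≤ j := by have := (PySem.List.mem_pyRange_one.mp hj).1; omega
  rw [pv_getD_enum pfull j hj0, pv_getD_enum pfull i hi0]

-- ===== VERDICT (by name: the statement is the Claim_ definition above) =====
theorem consistent_spec : Claim_equal_consistent := by
  intro peptide spectrum _ hpre
  unfold Spec_consistent consistent consistent_alt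
  have hpre' : ∀ c ∈ peptide.toList.dropWhile (fun c => decide (c ∈ pvAminoAcid)),
      c ∉ pvAminoAcid := by
    intro c hc
    have := List.all_eq_true.mp hpre c hc
    simpa using this
  rw [pv_spectra_eq peptide hpre']
  have hnkp : ∀ ls : List Int, (PySem.List.sorted ls (fun x => x) false).Pairwise (· ≤ ·) := by
    intro ls
    simpa using PySem.List.sorted_pairwise ls (fun x => x)
  rw [pvRemoveLoop_eq, pvTwoPtr_eq _ _ (hnkp _) (hnkp spectrum)]
  have : (↑(PySem.List.sorted spectrum (fun x => x) false) : Multiset Int) = ↑spectrum :=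
    Multiset.coe_eq_coe.mpr (PySem.List.sorted_perm spectrum (fun x => x) false)
  rw [this]
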